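-- pv_equiv track=rewrite | github.com/innov8-tist/seva-sarathi | python-server/services/drive-server.py | _adjust_index_for_smart_chips
-- ===== SOURCE A (Python) =====
-- def _adjust_index_for_smart_chips(text: str, index: int) -> int:
--     """Adjust index to account for smart chip placeholder expansion.
--
--     Smart chips appear as single Unicode characters in the document but are
--     replaced with '@[smart-chip]' (13 chars) in our extracted text. This function
--     converts from the extracted text index to the actual document index.
--     """
--     # Count smart chips before the given index
--     smart_chip_placeholder = "@[smart-chip]"
--     placeholder_len = len(smart_chip_placeholder)
--
--     # Track the actual document position
--     doc_pos = 0
--     text_pos = 0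
--
--     while text_pos < index and text_pos < len(text):
--         if text[text_pos : text_pos + placeholder_len] == smart_chip_placeholder:
--             # This is a smart chip - it's only 1 character in the document
--             doc_pos += 1
--             text_pos += placeholder_len
--         else:
--             # Regular character
--             doc_pos += 1
--             text_pos += 1
--
--     return doc_pos
-- ===== SOURCE B (Python) =====
-- def _adjust_index_for_smart_chips(text: str, index: int) -> int:
--     """Convert an extracted-text index to a document index, jumping between
--     smart-chip placeholder occurrences with str.find instead of stepping one
--     character at a time."""
--     placeholder = "@[smart-chip]"
--     limit = min(index, len(text))
--     doc_pos = 0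
--     pos = 0
--     while pos < limit:
--         nxt = text.find(placeholder, pos)
--         if nxt == -1 or nxt >= limit:
--             doc_pos += limit - pos
--             break
--         doc_pos += (nxt - pos) + 1
--         pos = nxt + len(placeholder)
--     return doc_pos
-- ===== Notes on version B (the rewrite author's own statement) =====
-- stated objective: faster
-- what changed: Replaces the per-character while-loop (with a 13-char slice comparison at every position) by a jump-between-occurrences pass: repeated str.find locates the next placeholder and whole runs of regular characters are counted in one arithmetic step.
import Mathlib
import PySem

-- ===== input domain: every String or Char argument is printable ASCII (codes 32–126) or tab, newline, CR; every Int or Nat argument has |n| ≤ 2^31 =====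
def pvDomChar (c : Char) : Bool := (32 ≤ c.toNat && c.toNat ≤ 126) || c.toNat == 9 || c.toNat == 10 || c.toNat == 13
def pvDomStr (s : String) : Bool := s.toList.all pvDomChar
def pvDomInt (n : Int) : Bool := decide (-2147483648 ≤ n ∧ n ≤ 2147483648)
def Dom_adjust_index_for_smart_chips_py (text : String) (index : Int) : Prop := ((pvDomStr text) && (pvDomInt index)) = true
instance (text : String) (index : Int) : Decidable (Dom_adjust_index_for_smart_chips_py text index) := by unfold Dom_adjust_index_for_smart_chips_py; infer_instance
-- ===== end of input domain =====

-- B counts regular-character runs in bulk by jumping between placeholder occurrences (str.find)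
-- instead of A's one-character-at-a-time scan with a slice comparison at every position.

-- the smart-chip placeholder, as a character list (shared constant of both programs)
def pvChip : List Char := "@[smart-chip]".toList

-- ===== PORT A =====
-- A's while-loop: doc_pos/text_pos state, 13-char slice comparison at each position
def pvLoopA (cs : List Char) (index : Int) (doc_pos : Int) (text_pos : Nat) : Int :=
  if h : (text_pos : Int) < index ∧ text_pos < cs.length then
    if PySem.List.slice cs (some (text_pos : Int)) (some ((text_pos : Int) + 13)) = pvChip then
      pvLoopA cs index (doc_pos + 1) (text_pos + 13)
    else
      pvLoopA cs index (doc_pos + 1) (text_pos + 1)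
  else doc_pos
termination_by cs.length - text_pos
decreasing_by all_goals omega

def adjust_index_for_smart_chips_py (text : String) (index : Int) : Int :=
  pvLoopA text.toList index 0 0

-- ===== PORT B =====
-- text.find(sub, pos) yields an index ≥ pos when it is not -1 (cited for termination of B's loop)
theorem pvFindFrom_ge (cs sub : List Char) (pos : Nat)
    (h : PySem.Chars.findFrom cs sub (pos : Int) none ≠ -1) :
    (pos : Int) ≤ PySem.Chars.findFrom cs sub (pos : Int) none := by
  by_cases hk : pos ≤ cs.length
  · exact (PySem.Chars.findFrom_natCast_spec cs sub pos hk h).1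
  · exfalso
    apply h
    simp only [PySem.Chars.findFrom]
    split_ifs <;> omega

-- B's while-loop: jump to the next placeholder occurrence, count each regular run in one step
def pvLoopB (cs : List Char) (limit : Int) (doc_pos : Int) (pos : Nat) : Int :=
  if h : (pos : Int) < limit then
    let nxt := PySem.Chars.findFrom cs pvChip (pos : Int) none
    if hn : nxt = -1 ∨ limit ≤ nxt then doc_pos + (limit - pos)
    else pvLoopB cs limit (doc_pos + (nxt - pos) + 1) (nxt.toNat + 13)
  else doc_pos
termination_by (limit - pos).toNat
decreasing_by
  have hge := pvFindFrom_ge cs pvChip pos (by omega)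
  omega

def adjust_index_for_smart_chips_py_alt (text : String) (index : Int) : Int :=
  pvLoopB text.toList (min index (text.toList.length : Int)) 0 0

-- ===== PRECONDITION & SPEC =====
def Spec_adjust_index_for_smart_chips_py (text : String) (index : Int) (out : Int) : Prop := out = adjust_index_for_smart_chips_py_alt text index
instance (text : String) (index : Int) (out : Int) : Decidable (Spec_adjust_index_for_smart_chips_py text index out) := by unfold Spec_adjust_index_for_smart_chips_py; infer_instance

-- ===== CLAIM (what is proved, stated in full; the proofs are below) =====
def Claim_equal_adjust_index_for_smart_chips_py : Prop := ∀ (text : String) (index : Int), Dom_adjust_index_for_smart_chips_py text index → Spec_adjust_index_for_smart_chips_py text index (adjust_index_for_smart_chips_py text index)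

-- ===== LEMMAS AND PROOFS =====

-- A's slice comparison at position p succeeds iff the placeholder is a prefix of cs.drop p
theorem pvSliceEq (cs : List Char) (p : Nat) :
    (PySem.List.slice cs (some (p : Int)) (some ((p : Int) + 13)) = pvChip) ↔ pvChip <+: cs.drop p := by
  have h13 : ((p : Int) + 13) = (p : Int) + ((13 : Nat) : Int) := by norm_num
  rw [h13, PySem.List.slice_natCast_add]
  constructor
  · intro h
    rw [← h]
    exact List.take_prefix _ _
  · intro h
    have hl : pvChip.length = 13 := by decide
    have := List.prefix_iff_eq_take.mp h
    rw [hl] at this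
    exact this.symm

-- the placeholder occurs in cs.drop p iff it starts at some position i ≥ p of cs
theorem pvInfixDrop (cs : List Char) (p : Nat) :
    pvChip <:+: cs.drop p ↔ ∃ i, p ≤ i ∧ pvChip <+: cs.drop i := by
  constructor
  · rintro ⟨s, t, hst⟩
    refine ⟨p + s.length, by omega, ?_⟩
    have hd : cs.drop (p + s.length) = (cs.drop p).drop s.length := List.drop_drop.symm
    rw [hd, ← hst, List.append_assoc, List.drop_left]
    exact List.prefix_append _ _
  · rintro ⟨i, hpi, hpre⟩
    have h1 : cs.drop i = (cs.drop p).drop (i - p) := by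
      rw [List.drop_drop]
      congr 1
      omega
    rw [h1] at hpre
    exact hpre.isInfix.trans (List.drop_suffix _ _).isInfix

-- unfolding lemmas for pvLoopA
theorem pvLoopA_else (cs : List Char) (index doc : Int) (pos : Nat)
    (h : ¬ ((pos : Int) < index ∧ pos < cs.length)) : pvLoopA cs index doc pos = doc := by
  rw [pvLoopA, dif_neg h]

theorem pvLoopA_chip (cs : List Char) (index doc : Int) (pos : Nat)
    (h : (pos : Int) < index ∧ pos < cs.length)
    (hc : PySem.List.slice cs (some (pos : Int)) (some ((pos : Int) + 13)) = pvChip) :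
    pvLoopA cs index doc pos = pvLoopA cs index (doc + 1) (pos + 13) := by
  rw [pvLoopA, dif_pos h, if_pos hc]

theorem pvLoopA_reg (cs : List Char) (index doc : Int) (pos : Nat)
    (h : (pos : Int) < index ∧ pos < cs.length)
    (hc : ¬ PySem.List.slice cs (some (pos : Int)) (some ((pos : Int) + 13)) = pvChip) :
    pvLoopA cs index doc pos = pvLoopA cs index (doc + 1) (pos + 1) := by
  rw [pvLoopA, dif_pos h, if_neg hc]

-- unfolding lemmas for pvLoopB
theorem pvLoopB_else (cs : List Char) (limit doc : Int) (pos : Nat)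
    (h : ¬ ((pos : Int) < limit)) : pvLoopB cs limit doc pos = doc := by
  rw [pvLoopB, dif_neg h]

theorem pvLoopB_break (cs : List Char) (limit doc : Int) (pos : Nat)
    (h : (pos : Int) < limit)
    (hn : PySem.Chars.findFrom cs pvChip (pos : Int) none = -1 ∨
          limit ≤ PySem.Chars.findFrom cs pvChip (pos : Int) none) :
    pvLoopB cs limit doc pos = doc + (limit - pos) := by
  rw [pvLoopB, dif_pos h]
  exact dif_pos hn

theorem pvLoopB_go (cs : List Char) (limit doc : Int) (pos : Nat)
    (h : (pos : Int) < limit)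
    (hn : ¬ (PySem.Chars.findFrom cs pvChip (pos : Int) none = -1 ∨
             limit ≤ PySem.Chars.findFrom cs pvChip (pos : Int) none)) :
    pvLoopB cs limit doc pos =
      pvLoopB cs limit (doc + (PySem.Chars.findFrom cs pvChip (pos : Int) none - pos) + 1)
        ((PySem.Chars.findFrom cs pvChip (pos : Int) none).toNat + 13) := by
  rw [pvLoopB, dif_pos h]
  exact dif_neg hn

-- if no placeholder starts at pos, find from pos and from pos+1 agree, and a hit lies beyond pos
theorem pvFindEqNext (cs : List Char) (pos : Nat) (hlen : pos < cs.length)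
    (hm : ¬ pvChip <+: cs.drop pos) :
    PySem.Chars.findFrom cs pvChip ((pos : Nat) : Int) none
      = PySem.Chars.findFrom cs pvChip (((pos + 1 : Nat)) : Int) none ∧
    (PySem.Chars.findFrom cs pvChip (pos : Int) none ≠ -1 →
      (pos : Int) + 1 ≤ PySem.Chars.findFrom cs pvChip (pos : Int) none) := by
  have hk : pos ≤ cs.length := le_of_lt hlen
  have hk1 : pos + 1 ≤ cs.length := hlen
  by_cases hF : PySem.Chars.findFrom cs pvChip (pos : Int) none = -1
  · have hni : ¬ pvChip <:+: cs.drop pos :=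
      (PySem.Chars.findFrom_natCast_eq_neg_one_iff cs pvChip pos hk).mp hF
    have hni1 : ¬ pvChip <:+: cs.drop (pos + 1) := by
      intro h
      rcases (pvInfixDrop cs (pos + 1)).mp h with ⟨i, hi, hp⟩
      exact hni ((pvInfixDrop cs pos).mpr ⟨i, by omega, hp⟩)
    have hF1 : PySem.Chars.findFrom cs pvChip ((pos + 1 : Nat) : Int) none = -1 :=
      (PySem.Chars.findFrom_natCast_eq_neg_one_iff cs pvChip (pos + 1) hk1).mpr hni1
    exact ⟨by rw [hF, hF1], fun hc => absurd hF hc⟩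
  · obtain ⟨h1, h2, h3⟩ := PySem.Chars.findFrom_natCast_spec cs pvChip pos hk hF
    have hne : (PySem.Chars.findFrom cs pvChip (pos : Int) none).toNat ≠ pos := by
      intro he
      exact hm (he ▸ h2)
    have hge1 : pos + 1 ≤ (PySem.Chars.findFrom cs pvChip (pos : Int) none).toNat := by omega
    have hinf1 : pvChip <:+: cs.drop (pos + 1) :=
      (pvInfixDrop cs (pos + 1)).mpr ⟨_, hge1, h2⟩
    have hF1 : PySem.Chars.findFrom cs pvChip ((pos + 1 : Nat) : Int) none ≠ -1 := by
      rw [Ne, PySem.Chars.findFrom_natCast_eq_neg_one_iff cs pvChip (pos + 1) hk1]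
      exact not_not_intro hinf1
    obtain ⟨h1', h2', h3'⟩ := PySem.Chars.findFrom_natCast_spec cs pvChip (pos + 1) hk1 hF1
    have e1 : ¬ (PySem.Chars.findFrom cs pvChip ((pos + 1 : Nat) : Int) none).toNat
        < (PySem.Chars.findFrom cs pvChip (pos : Int) none).toNat := by
      intro hlt
      exact h3 _ (by omega) hlt h2'
    have e2 : ¬ (PySem.Chars.findFrom cs pvChip (pos : Int) none).toNat
        < (PySem.Chars.findFrom cs pvChip ((pos + 1 : Nat) : Int) none).toNat := by
      intro hlt
      exact h3' _ hge1 hlt h2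
    exact ⟨by omega, fun _ => by omega⟩

-- one A-step on a regular character leaves B's result unchanged
theorem pvLoopB_step (cs : List Char) (limit : Int) (hlim : limit ≤ (cs.length : Int))
    (pos : Nat) (doc : Int) (hpos : (pos : Int) < limit) (hm : ¬ pvChip <+: cs.drop pos) :
    pvLoopB cs limit doc pos = pvLoopB cs limit (doc + 1) (pos + 1) := by
  have hlen : pos < cs.length := by omega
  obtain ⟨hFF, hge⟩ := pvFindEqNext cs pos hlen hm
  by_cases hn : PySem.Chars.findFrom cs pvChip (pos : Int) none = -1 ∨
      limit ≤ PySem.Chars.findFrom cs pvChip (pos : Int) none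
  · rw [pvLoopB_break cs limit doc pos hpos hn]
    by_cases hp1 : ((pos + 1 : Nat) : Int) < limit
    · rw [pvLoopB_break cs limit (doc + 1) (pos + 1) hp1 (by rw [← hFF]; exact hn)]
      push_cast
      ring
    · rw [pvLoopB_else cs limit (doc + 1) (pos + 1) hp1]
      push_cast at hp1 ⊢
      omega
  · have hnne : PySem.Chars.findFrom cs pvChip (pos : Int) none ≠ -1 := by
      intro h
      exact hn (Or.inl h)
    have hp1 : ((pos + 1 : Nat) : Int) < limit := by
      have := hge hnne
      push_cast
      omega
    rw [pvLoopB_go cs limit doc pos hpos hn,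
        pvLoopB_go cs limit (doc + 1) (pos + 1) hp1 (by rw [← hFF]; exact hn)]
    rw [← hFF]
    congr 1
    push_cast
    ring

-- main invariant: A's scan equals B's jump loop with limit = min(index, len(text))
theorem pvMain (cs : List Char) (index : Int) :
    ∀ (n pos : Nat) (doc : Int), cs.length ≤ pos + n →
      pvLoopA cs index doc pos = pvLoopB cs (min index (cs.length : Int)) doc pos := by
  intro n
  induction n with
  | zero =>
    intro pos doc hn
    rw [pvLoopA_else cs index doc pos (by rintro ⟨-, h⟩; omega),
        pvLoopB_else cs _ doc pos (by rw [lt_min_iff]; rintro ⟨-, h⟩; omega)]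
  | succ n ih =>
    intro pos doc hn
    by_cases hpos : (pos : Int) < min index (cs.length : Int)
    · obtain ⟨hpi, hpl⟩ := lt_min_iff.mp hpos
      have hcond : (pos : Int) < index ∧ pos < cs.length := ⟨hpi, by omega⟩
      by_cases hc : pvChip <+: cs.drop pos
      · rw [pvLoopA_chip cs index doc pos hcond ((pvSliceEq cs pos).mpr hc)]
        have hk : pos ≤ cs.length := le_of_lt hcond.2
        have hFne : PySem.Chars.findFrom cs pvChip (pos : Int) none ≠ -1 := by
          rw [Ne, PySem.Chars.findFrom_natCast_eq_neg_one_iff cs pvChip pos hk]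
          exact not_not_intro ((pvInfixDrop cs pos).mpr ⟨pos, le_refl _, hc⟩)
        obtain ⟨h1, h2, h3⟩ := PySem.Chars.findFrom_natCast_spec cs pvChip pos hk hFne
        have hFp : PySem.Chars.findFrom cs pvChip (pos : Int) none = (pos : Int) := by
          have hnl : ¬ pos < (PySem.Chars.findFrom cs pvChip (pos : Int) none).toNat := by
            intro hlt
            exact h3 pos le_rfl hlt hc
          omega
        rw [pvLoopB_go cs _ doc pos hpos (by rw [hFp]; refine fun h => ?_; rcases h with h | h <;> omega)]
        rw [hFp]
        have hacc : doc + ((pos : Int) - (pos : Int)) + 1 = doc + 1 := by ring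
        have htn : ((pos : Int)).toNat = pos := Int.toNat_natCast pos
        rw [hacc, htn]
        exact ih (pos + 13) (doc + 1) (by omega)
      · rw [pvLoopA_reg cs index doc pos hcond (fun h => hc ((pvSliceEq cs pos).mp h))]
        rw [ih (pos + 1) (doc + 1) (by omega)]
        exact (pvLoopB_step cs _ (min_le_right _ _) pos doc hpos hc).symm
    · rw [pvLoopB_else cs _ doc pos hpos,
          pvLoopA_else cs index doc pos
            (fun h => hpos (lt_min_iff.mpr ⟨h.1, by omega⟩))]

-- ===== VERDICT (by name: the statement is the Claim_ definition above) =====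
theorem adjust_index_for_smart_chips_py_spec : Claim_equal_adjust_index_for_smart_chips_py := by
  intro text index _
  unfold Spec_adjust_index_for_smart_chips_py adjust_index_for_smart_chips_py
    adjust_index_for_smart_chips_py_alt
  exact pvMain text.toList index text.toList.length 0 0 (by omega)
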